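-- pv_equiv track=rewrite | github.com/gingeraffee/Arcanara | arcanara_bot.py | _rank_card_matches
-- ===== SOURCE A (Python) =====
-- from typing import Dict, Any, List, Optional
--
-- def _rank_card_matches(query: str, names: List[str], limit: int = 25) -> List[str]:
--     q = (query or "").strip().lower()
--     if not q:
--         return names[:limit]
--
--     starts = []
--     contains = []
--     for n in names:
--         nl = n.lower()
--         if nl.startswith(q):
--             starts.append(n)
--         elif q in nl:
--             contains.append(n)
--
--     # Startswith matches first, then contains matches
--     results = starts + contains
--     return results[:limit]
-- ===== SOURCE B (Python) =====
-- def _rank_card_matches(query, names, limit=25):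
--     q = (query or "").strip().lower()
--     if not q:
--         return names[:limit]
--     matches = [n for n in names if q in n.lower()]
--     matches.sort(key=lambda n: 0 if n.lower().startswith(q) else 1)
--     return matches[:limit]
-- ===== Notes on version B (the rewrite author's own statement) =====
-- stated objective: simpler
-- what changed: Replaces the two-bucket partition loop (starts/contains lists appended in a single for) by filtering to substring matches and one stable sort keyed 0 for prefix matches, 1 otherwise.
import Mathlib
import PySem

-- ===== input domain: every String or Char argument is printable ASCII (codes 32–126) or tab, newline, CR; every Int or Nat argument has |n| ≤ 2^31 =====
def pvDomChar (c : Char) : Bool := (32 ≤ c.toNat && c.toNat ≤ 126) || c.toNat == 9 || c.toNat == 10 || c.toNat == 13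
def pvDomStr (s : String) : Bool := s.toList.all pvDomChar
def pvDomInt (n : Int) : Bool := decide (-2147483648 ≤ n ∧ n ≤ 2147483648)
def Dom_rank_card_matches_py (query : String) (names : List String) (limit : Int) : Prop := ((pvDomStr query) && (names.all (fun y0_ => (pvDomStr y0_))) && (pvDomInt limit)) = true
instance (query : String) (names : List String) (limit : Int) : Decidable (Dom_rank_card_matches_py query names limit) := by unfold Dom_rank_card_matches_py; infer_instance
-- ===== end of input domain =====

-- B replaces A's two-bucket partition loop by a filter + one stable sort keyed 0/1 (simpler decomposition, same cost class).

-- ===== PORT A =====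
-- A's for-loop over names with the two accumulator lists 'starts' and 'contains'.
def rank_card_matches_py (query : String) (names : List String) (limit : Int) : List String :=
  let q := PySem.Str.lower (PySem.Str.strip query)   -- (query or "").strip().lower(); 'or ""' is the identity on str inputs
  if q = "" then PySem.List.slice names none (some limit)
  else
    let sc := names.foldl (fun (sc : List String × List String) n =>
      let nl := PySem.Str.lower n
      if PySem.Str.startswith nl q then (sc.1 ++ [n], sc.2)
      else if PySem.Str.isIn q nl then (sc.1, sc.2 ++ [n])
      else sc) ([], [])
    PySem.List.slice (sc.1 ++ sc.2) none (some limit)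

-- ===== PORT B =====
def rank_card_matches_py_alt (query : String) (names : List String) (limit : Int) : List String :=
  let q := PySem.Str.lower (PySem.Str.strip query)
  if q = "" then PySem.List.slice names none (some limit)
  else
    let ms := names.filter (fun n => PySem.Str.isIn q (PySem.Str.lower n))
    let sortedMs := PySem.List.sorted ms
      (fun n => if PySem.Str.startswith (PySem.Str.lower n) q then (0 : Int) else 1) false
    PySem.List.slice sortedMs none (some limit)

-- ===== PRECONDITION & SPEC =====
def Spec_rank_card_matches_py (query : String) (names : List String) (limit : Int) (out : List String) : Prop := out = rank_card_matches_py_alt query names limit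
instance (query : String) (names : List String) (limit : Int) (out : List String) : Decidable (Spec_rank_card_matches_py query names limit out) := by unfold Spec_rank_card_matches_py; infer_instance

-- ===== CLAIM (what is proved, stated in full; the proofs are below) =====
def Claim_equal_rank_card_matches_py : Prop := ∀ (query : String) (names : List String) (limit : Int), Dom_rank_card_matches_py query names limit → Spec_rank_card_matches_py query names limit (rank_card_matches_py query names limit)

-- ===== LEMMAS AND PROOFS =====

-- insertBy puts x right between a block it does not go before and a block it goes before.
theorem insertBy_between {α : Type} (before : α → α → Bool) (x : α) (A B : List α)
    (hA : ∀ a ∈ A, before x a = false) (hB : ∀ b ∈ B, before x b = true) :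
    PySem.List.insertBy before x (A ++ B) = A ++ x :: B := by
  induction A with
  | nil =>
    cases B with
    | nil => rfl
    | cons y ys => simp [PySem.List.insertBy, hB y (by simp)]
  | cons a A' ih =>
    simp only [List.cons_append, PySem.List.insertBy, hA a (by simp)]
    have := ih (fun a ha => hA a (by simp [ha]))
    simp only [this]
    simp

-- the stable-sort invariant for a {0,1}-valued key: the p-block grows in order, then the rest
theorem foldl_insertBy_binary {α : Type} (p : α → Bool) (xs : List α) : ∀ (A B : List α),
    (∀ a ∈ A, p a = true) → (∀ b ∈ B, p b = false) →
    xs.foldl (fun acc x => PySem.List.insertBy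
        (fun a b => decide ((if p a then (0 : Int) else 1) < (if p b then (0 : Int) else 1))) x acc)
      (A ++ B)
    = (A ++ xs.filter p) ++ (B ++ xs.filter (fun x => !p x)) := by
  induction xs with
  | nil => intro A B _ _; simp
  | cons x xs ih =>
    intro A B hA hB
    by_cases hx : p x = true
    · have hins : PySem.List.insertBy
          (fun a b => decide ((if p a then (0 : Int) else 1) < (if p b then (0 : Int) else 1))) x (A ++ B)
          = (A ++ [x]) ++ B := by
        have h := insertBy_between
          (fun a b => decide ((if p a then (0 : Int) else 1) < (if p b then (0 : Int) else 1)))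
          x A B (fun a ha => by simp [hx, hA a ha]) (fun b hb => by simp [hx, hB b hb])
        simpa using h
      have hA' : ∀ a ∈ A ++ [x], p a = true := by
        intro a ha
        rcases List.mem_append.1 ha with h | h
        · exact hA a h
        · simp at h; simpa [h] using hx
      rw [List.foldl_cons, hins, ih (A ++ [x]) B hA' hB]
      simp [hx]
    · have hx' : p x = false := by simpa using hx
      have hins : PySem.List.insertBy
          (fun a b => decide ((if p a then (0 : Int) else 1) < (if p b then (0 : Int) else 1))) x (A ++ B)
          = A ++ (B ++ [x]) := by
        have h := insertBy_between
          (fun a b => decide ((if p a then (0 : Int) else 1) < (if p b then (0 : Int) else 1)))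
          x (A ++ B) []
          (by
            intro a ha
            rcases List.mem_append.1 ha with h | h
            · simp [hx', hA a h]
            · simp [hx', hB a h])
          (by intro b hb; simp at hb)
        simpa using h
      have hB' : ∀ b ∈ B ++ [x], p b = false := by
        intro b hb
        rcases List.mem_append.1 hb with h | h
        · exact hB b h
        · simp at h; simpa [h] using hx'
      rw [List.foldl_cons, hins, ih A (B ++ [x]) hA hB']
      simp [hx']

-- stable sort by the binary key IS partition: key-0 elements first (in order), then the rest
theorem sorted_binary_partition {α : Type} (p : α → Bool) (xs : List α) :
    PySem.List.sorted xs (fun x => if p x then (0 : Int) else 1) false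
    = xs.filter p ++ xs.filter (fun x => !p x) := by
  rw [PySem.List.sorted_eq_foldl_insertBy]
  simpa using foldl_insertBy_binary p xs [] [] (by simp) (by simp)

-- a prefix is a substring
theorem startswith_isIn (q nl : String) (h : PySem.Str.startswith nl q = true) :
    PySem.Str.isIn q nl = true := by
  rw [PySem.Str.isIn_iff_infix]
  have := (PySem.Str.startswith_eq nl q) ▸ h
  exact (PySem.Chars.startswith_iff nl.toList q.toList |>.1 this).isInfix

-- A's partition loop computes the two filters (generic over the two Bool tests)
theorem foldl_partition {α : Type} (f g : α → Bool) (xs : List α) : ∀ (s c : List α),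
    xs.foldl (fun (sc : List α × List α) n =>
      if f n then (sc.1 ++ [n], sc.2)
      else if g n then (sc.1, sc.2 ++ [n])
      else sc) (s, c)
    = (s ++ xs.filter f, c ++ xs.filter (fun n => !f n && g n)) := by
  induction xs with
  | nil => intro s c; simp
  | cons x xs ih =>
    intro s c
    by_cases h1 : f x = true
    · simp only [List.foldl_cons, if_true, ih, List.filter_cons, h1, Bool.not_true,
        Bool.false_and]
      simp
    · have h1' : f x = false := by simpa using h1
      by_cases h2 : g x = true
      · simp only [List.foldl_cons, h1', Bool.false_eq_true, if_false, h2, if_true, ih,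
          List.filter_cons, Bool.not_false, Bool.true_and]
        simp
      · have h2' : g x = false := by simpa using h2
        simp only [List.foldl_cons, h1', h2', Bool.false_eq_true, if_false, ih, List.filter_cons]
        simp

-- ===== VERDICT (by name: the statement is the Claim_ definition above) =====
theorem rank_card_matches_py_spec : Claim_equal_rank_card_matches_py := by
  intro query names limit _
  unfold Spec_rank_card_matches_py rank_card_matches_py rank_card_matches_py_alt
  set q := PySem.Str.lower (PySem.Str.strip query) with hq
  by_cases h : q = ""
  · simp [h]
  · simp only [h, if_false]
    have hfold := foldl_partition (fun n => PySem.Str.startswith (PySem.Str.lower n) q)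
      (fun n => PySem.Str.isIn q (PySem.Str.lower n)) names [] []
    rw [show (names.foldl (fun (sc : List String × List String) n =>
          let nl := PySem.Str.lower n
          if PySem.Str.startswith nl q then (sc.1 ++ [n], sc.2)
          else if PySem.Str.isIn q nl then (sc.1, sc.2 ++ [n])
          else sc) ([], [])) =
        ([] ++ names.filter (fun n => PySem.Str.startswith (PySem.Str.lower n) q),
         [] ++ names.filter (fun n => !PySem.Str.startswith (PySem.Str.lower n) q
            && PySem.Str.isIn q (PySem.Str.lower n))) from hfold]
    rw [sorted_binary_partition]
    simp only [List.nil_append]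
    have e1 : List.filter (fun n => !PySem.Str.startswith (PySem.Str.lower n) q)
          (List.filter (fun n => PySem.Str.isIn q (PySem.Str.lower n)) names)
        = List.filter (fun n => !PySem.Str.startswith (PySem.Str.lower n) q
            && PySem.Str.isIn q (PySem.Str.lower n)) names := by
      rw [List.filter_filter]
    have e2 : List.filter (fun n => PySem.Str.startswith (PySem.Str.lower n) q)
          (List.filter (fun n => PySem.Str.isIn q (PySem.Str.lower n)) names)
        = List.filter (fun n => PySem.Str.startswith (PySem.Str.lower n) q) names := by
      rw [List.filter_filter]
      apply List.filter_congr
      intro n _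
      by_cases hs : PySem.Str.startswith (PySem.Str.lower n) q = true
      · simp only [hs, startswith_isIn q _ hs, Bool.and_self]
      · simp only [Bool.eq_false_iff.2 hs, Bool.false_and]
    rw [e1, e2]
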